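-- pv_equiv track=rewrite | github.com/Xizzzy/alpha-omega | alpha_omega/sigma.py | _is_value_dependent
-- ===== SOURCE A (Python) =====
-- def _is_value_dependent(rounds):
--     """Check if disagreement is about values/priorities rather than facts."""
--     keywords = ("priority", "preference", "depends on", "trade-off", "tradeoff",
--                 "user choice", "business decision", "value judgment")
--     for r in rounds:
--         for c in r.get("critiques", []):
--             text = c.get("text", "").lower()
--             if any(kw in text for kw in keywords):
--                 return True
--     return False
-- ===== SOURCE B (Python) =====
-- def _is_value_dependent(rounds):
--     """Check if disagreement is about values/priorities rather than facts."""
--     keywords = ("priority", "preference", "depends on", "trade-off", "tradeoff",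
--                 "user choice", "business decision", "value judgment")
--     # Stage 1: collect all lowered critique texts across all rounds.
--     texts = []
--     for r in rounds:
--         for c in r.get("critiques", []):
--             texts.append(c.get("text", "").lower())
--     # Stage 2: keyword-major scan — for each keyword, look through all texts.
--     for kw in keywords:
--         for t in texts:
--             if kw in t:
--                 return True
--     return False
-- ===== Notes on version B (the rewrite author's own statement) =====
-- stated objective: alternative
-- what changed: A interleaves extraction and matching (per critique, test all keywords, early return); B first collects all lowered critique texts into a list, then does a keyword-major scan (for each keyword, scan all texts), swapping the loop nesting and staging the passes.
import Mathlib
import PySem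

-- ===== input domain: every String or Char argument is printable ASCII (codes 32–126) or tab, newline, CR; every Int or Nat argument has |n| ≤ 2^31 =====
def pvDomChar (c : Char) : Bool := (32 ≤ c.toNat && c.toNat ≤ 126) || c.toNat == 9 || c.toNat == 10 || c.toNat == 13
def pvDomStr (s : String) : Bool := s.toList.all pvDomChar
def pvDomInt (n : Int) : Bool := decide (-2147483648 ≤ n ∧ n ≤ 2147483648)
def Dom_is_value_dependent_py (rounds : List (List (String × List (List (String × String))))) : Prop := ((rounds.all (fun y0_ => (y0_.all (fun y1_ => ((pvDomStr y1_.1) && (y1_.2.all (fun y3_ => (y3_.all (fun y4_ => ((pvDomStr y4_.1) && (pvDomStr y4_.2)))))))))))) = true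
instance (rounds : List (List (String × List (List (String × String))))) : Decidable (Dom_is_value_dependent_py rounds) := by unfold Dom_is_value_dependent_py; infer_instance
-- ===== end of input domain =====

-- B stages the work: first collect all lowered critique texts into a list, then do a
-- keyword-major scan over that list (loop nesting swapped); alternative decomposition, same asymptotic cost.


-- ===== PORT A =====
def is_value_dependent_py (rounds : List (List (String × List (List (String × String))))) : Bool :=
  let keywords : List String := ["priority", "preference", "depends on", "trade-off", "tradeoff",
                                 "user choice", "business decision", "value judgment"]
  rounds.any (fun r =>
    (PySem.Dict.getD (PySem.Dict.mk r) "critiques" []).any (fun c =>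
      let text := PySem.Str.lower (PySem.Dict.getD (PySem.Dict.mk c) "text" "")
      keywords.any (fun kw => PySem.Str.isIn kw text)))

-- ===== PORT B =====
-- Stage 1 of Source B: collect every lowered critique text, round by round.
def pvCollectTexts : List (List (String × List (List (String × String)))) → List String
  | [] => []
  | r :: rest =>
      (PySem.Dict.getD (PySem.Dict.mk r) "critiques" []).map
        (fun c => PySem.Str.lower (PySem.Dict.getD (PySem.Dict.mk c) "text" ""))
      ++ pvCollectTexts rest

-- inner loop of stage 2: does kw occur in any of the texts?
def pvScanTexts (kw : String) : List String → Bool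
  | [] => false
  | t :: ts => if PySem.Str.isIn kw t then true else pvScanTexts kw ts

-- outer loop of stage 2: try each keyword in turn against the whole text list
def pvScanKeywords (texts : List String) : List String → Bool
  | [] => false
  | kw :: kws => if pvScanTexts kw texts then true else pvScanKeywords texts kws

def is_value_dependent_py_alt (rounds : List (List (String × List (List (String × String))))) : Bool :=
  pvScanKeywords (pvCollectTexts rounds)
    ["priority", "preference", "depends on", "trade-off", "tradeoff",
     "user choice", "business decision", "value judgment"]

-- ===== PRECONDITION & SPEC =====
def Spec_is_value_dependent_py (rounds : List (List (String × List (List (String × String))))) (out : Bool) : Prop := out = is_value_dependent_py_alt rounds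
instance (rounds : List (List (String × List (List (String × String))))) (out : Bool) : Decidable (Spec_is_value_dependent_py rounds out) := by unfold Spec_is_value_dependent_py; infer_instance

-- ===== CLAIM (what is proved, stated in full; the proofs are below) =====
def Claim_equal_is_value_dependent_py : Prop := ∀ (rounds : List (List (String × List (List (String × String))))), Dom_is_value_dependent_py rounds → Spec_is_value_dependent_py rounds (is_value_dependent_py rounds)

-- ===== LEMMAS AND PROOFS =====

theorem pvScanTexts_eq_any (kw : String) (ts : List String) :
    pvScanTexts kw ts = ts.any (fun t => PySem.Str.isIn kw t) := by
  induction ts with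
  | nil => rfl
  | cons t ts ih =>
    rw [pvScanTexts, ih, List.any_cons]
    cases PySem.Str.isIn kw t <;> simp

theorem pvScanKeywords_eq_any (ts kws : List String) :
    pvScanKeywords ts kws = kws.any (fun kw => ts.any (fun t => PySem.Str.isIn kw t)) := by
  induction kws with
  | nil => rfl
  | cons kw kws ih =>
    rw [pvScanKeywords, pvScanTexts_eq_any, ih, List.any_cons]
    cases ts.any fun t => PySem.Str.isIn kw t <;> simp

-- swapping the two any-loops does not change the result
theorem pv_any_swap {α β : Type} (xs : List α) (ys : List β) (p : α → β → Bool) :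
    xs.any (fun x => ys.any (fun y => p x y)) = ys.any (fun y => xs.any (fun x => p x y)) := by
  rw [Bool.eq_iff_iff]; simp only [List.any_eq_true]
  exact ⟨fun ⟨x, hx, y, hy, h⟩ => ⟨y, hy, x, hx, h⟩, fun ⟨y, hy, x, hx, h⟩ => ⟨x, hx, y, hy, h⟩⟩

theorem pvCollectTexts_eq_flatMap (rounds : List (List (String × List (List (String × String))))) :
    pvCollectTexts rounds = rounds.flatMap (fun r =>
      (PySem.Dict.getD (PySem.Dict.mk r) "critiques" []).map
        (fun c => PySem.Str.lower (PySem.Dict.getD (PySem.Dict.mk c) "text" ""))) := by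
  induction rounds with
  | nil => rfl
  | cons r rest ih => simp [pvCollectTexts, ih]

-- ===== VERDICT (by name: the statement is the Claim_ definition above) =====
theorem is_value_dependent_py_spec : Claim_equal_is_value_dependent_py := by
  intro rounds _
  unfold Spec_is_value_dependent_py is_value_dependent_py is_value_dependent_py_alt
  rw [pvScanKeywords_eq_any, pvCollectTexts_eq_flatMap, pv_any_swap]
  simp only [List.any_flatMap, List.any_map, Function.comp_def]
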